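-- pv_equiv track=rewrite | github.com/ghkdxodn84-oss/KORStockScan | src/engine/holding_exit_observation_report.py | _fill_quality
-- ===== SOURCE A (Python) =====
-- def _fill_quality(row: dict) -> str:
--     qualities: list[str] = []
--     for event in row.get("timeline") or []:
--         if not isinstance(event, dict):
--             continue
--         fields = event.get("fields") or {}
--         value = str(fields.get("fill_quality") or "").strip().upper()
--         if value:
--             qualities.append(value)
--     if any("PARTIAL" in quality for quality in qualities):
--         return "partial_fill"
--     if any("FULL" in quality for quality in qualities):
--         return "full_fill"
--     return "unknown_fill"
-- ===== SOURCE B (Python) =====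
-- _QUALITY_TABLE = ("unknown_fill", "full_fill", "partial_fill")
--
--
-- def _event_rank(event) -> int:
--     if not isinstance(event, dict):
--         return 0
--     value = str((event.get("fields") or {}).get("fill_quality") or "").strip().upper()
--     if "PARTIAL" in value:
--         return 2
--     if "FULL" in value:
--         return 1
--     return 0
--
--
-- def _fill_quality(row: dict) -> str:
--     rank = max((_event_rank(event) for event in row.get("timeline") or []), default=0)
--     return _QUALITY_TABLE[rank]
-- ===== Notes on version B (the rewrite author's own statement) =====
-- stated objective: alternative
-- what changed: Replaced A's collect-normalized-values-then-two-any()-scans by mapping each event to a numeric severity rank (PARTIAL=2, FULL=1, else 0), taking the max of the ranks, and indexing a result table; PARTIAL-over-FULL precedence becomes the numeric order of ranks.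
import Mathlib
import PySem

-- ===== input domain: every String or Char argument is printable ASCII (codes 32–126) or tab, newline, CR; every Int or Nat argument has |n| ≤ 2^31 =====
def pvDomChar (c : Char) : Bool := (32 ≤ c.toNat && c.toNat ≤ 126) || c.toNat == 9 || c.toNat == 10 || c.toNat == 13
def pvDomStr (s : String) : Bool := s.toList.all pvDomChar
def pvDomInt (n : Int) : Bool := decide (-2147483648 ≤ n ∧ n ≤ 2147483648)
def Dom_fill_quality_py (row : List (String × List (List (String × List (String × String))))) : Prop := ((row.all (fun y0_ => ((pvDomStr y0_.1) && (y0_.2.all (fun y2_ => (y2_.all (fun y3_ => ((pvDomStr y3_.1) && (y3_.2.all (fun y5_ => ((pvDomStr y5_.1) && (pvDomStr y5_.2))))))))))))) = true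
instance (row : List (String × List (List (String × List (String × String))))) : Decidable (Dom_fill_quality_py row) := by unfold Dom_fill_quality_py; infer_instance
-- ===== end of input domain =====

-- B replaces A's collect-then-two-any()-scans by a max over numeric severity ranks plus a table lookup (alternative decomposition; same cost).

-- ===== PORT A =====
-- literal port of A: build the `qualities` list, then two any() scans (PARTIAL first)
def fill_quality_py (row : List (String × List (List (String × List (String × String))))) : String :=
  let qualities : List String :=
    (((PySem.Dict.mk row).get? "timeline").getD []).foldl
      (fun (qs : List String) event =>
        let fields := ((PySem.Dict.mk event).get? "fields").getD []
        let value := PySem.Str.upper (PySem.Str.strip (((PySem.Dict.mk fields).get? "fill_quality").getD ""))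
        if value ≠ "" then qs ++ [value] else qs) []
  if qualities.any (fun q => PySem.Str.isIn "PARTIAL" q) then "partial_fill"
  else if qualities.any (fun q => PySem.Str.isIn "FULL" q) then "full_fill"
  else "unknown_fill"

-- ===== PORT B =====
-- literal port of B's helper _event_rank (events are always dicts under the type convention)
def pv_event_rank (event : List (String × List (String × String))) : Nat :=
  let value := PySem.Str.upper (PySem.Str.strip (((PySem.Dict.mk (((PySem.Dict.mk event).get? "fields").getD [])).get? "fill_quality").getD ""))
  if PySem.Str.isIn "PARTIAL" value then 2
  else if PySem.Str.isIn "FULL" value then 1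
  else 0

-- literal port of B: max of ranks (default 0), then table lookup
def fill_quality_py_alt (row : List (String × List (List (String × List (String × String))))) : String :=
  let rank : Nat :=
    ((((PySem.Dict.mk row).get? "timeline").getD []).map pv_event_rank).foldl max 0
  match rank with
  | 0 => "unknown_fill"
  | 1 => "full_fill"
  | _ => "partial_fill"

-- ===== PRECONDITION & SPEC =====
def Spec_fill_quality_py (row : List (String × List (List (String × List (String × String))))) (out : String) : Prop := out = fill_quality_py_alt row
instance (row : List (String × List (List (String × List (String × String))))) (out : String) : Decidable (Spec_fill_quality_py row out) := by unfold Spec_fill_quality_py; infer_instance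

-- ===== CLAIM (what is proved, stated in full; the proofs are below) =====
def Claim_equal_fill_quality_py : Prop := ∀ (row : List (String × List (List (String × List (String × String))))), Dom_fill_quality_py row → Spec_fill_quality_py row (fill_quality_py row)

-- ===== LEMMAS AND PROOFS =====

-- the abstraction function: A's fold state (the qualities list) summarized as B's rank
def pv_absr (qs : List String) : Nat :=
  if qs.any (fun q => PySem.Str.isIn "PARTIAL" q) then 2
  else if qs.any (fun q => PySem.Str.isIn "FULL" q) then 1
  else 0

-- one step commutes: appending a (possibly empty) value to A's state corresponds to max with its rank
theorem pv_absr_step (qs : List String) (v : String) :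
    pv_absr (if v ≠ "" then qs ++ [v] else qs) =
    max (pv_absr qs)
      (if PySem.Str.isIn "PARTIAL" v then 2 else if PySem.Str.isIn "FULL" v then 1 else 0) := by
  by_cases hv : v = ""
  · subst hv
    have h0 : (if PySem.Str.isIn "PARTIAL" "" then 2
               else if PySem.Str.isIn "FULL" "" then (1 : Nat) else 0) = 0 := by decide
    rw [h0]
    simp
  · simp only [hv, ne_eq, not_false_eq_true, if_pos, pv_absr, List.any_append, List.any_cons,
      List.any_nil, Bool.or_false]
    cases hP : PySem.Str.isIn "PARTIAL" v <;>
      cases hF : PySem.Str.isIn "FULL" v <;>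
        cases hQP : qs.any (fun q => PySem.Str.isIn "PARTIAL" q) <;>
          cases hQF : qs.any (fun q => PySem.Str.isIn "FULL" q) <;>
            simp

-- loop invariant, generic in the per-event normalization v: B's max-of-ranks fold equals
-- the abstraction of A's accumulated list
theorem pv_inv {α : Type} (v : α → String) (l : List α) (qs : List String) :
    (l.map (fun e => if PySem.Str.isIn "PARTIAL" (v e) then 2
                     else if PySem.Str.isIn "FULL" (v e) then 1 else 0)).foldl max (pv_absr qs) =
    pv_absr (l.foldl (fun (qs : List String) e => if v e ≠ "" then qs ++ [v e] else qs) qs) := by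
  induction l generalizing qs with
  | nil => simp
  | cons e rest ih =>
    simp only [List.map_cons, List.foldl_cons]
    rw [← pv_absr_step qs (v e)]
    exact ih _

-- ===== VERDICT (by name: the statement is the Claim_ definition above) =====
theorem fill_quality_py_spec : Claim_equal_fill_quality_py := by
  intro row _
  unfold Spec_fill_quality_py fill_quality_py fill_quality_py_alt
  have he : pv_event_rank = (fun event : List (String × List (String × String)) =>
      if PySem.Str.isIn "PARTIAL" (PySem.Str.upper (PySem.Str.strip
        (((PySem.Dict.mk (((PySem.Dict.mk event).get? "fields").getD [])).get? "fill_quality").getD ""))) then 2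
      else if PySem.Str.isIn "FULL" (PySem.Str.upper (PySem.Str.strip
        (((PySem.Dict.mk (((PySem.Dict.mk event).get? "fields").getD [])).get? "fill_quality").getD ""))) then 1
      else 0) := rfl
  have h := pv_inv
      (fun event => PySem.Str.upper (PySem.Str.strip
        (((PySem.Dict.mk (((PySem.Dict.mk event).get? "fields").getD [])).get? "fill_quality").getD "")))
      (((PySem.Dict.mk row).get? "timeline").getD []) []
  have habs0 : pv_absr [] = 0 := by simp [pv_absr]
  rw [habs0] at h
  rw [he, h]
  unfold pv_absr
  cases hP : ((((PySem.Dict.mk row).get? "timeline").getD []).foldl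
      (fun (qs : List String) event =>
        if PySem.Str.upper (PySem.Str.strip (((PySem.Dict.mk (((PySem.Dict.mk event).get? "fields").getD [])).get? "fill_quality").getD "")) ≠ "" then
          qs ++ [PySem.Str.upper (PySem.Str.strip (((PySem.Dict.mk (((PySem.Dict.mk event).get? "fields").getD [])).get? "fill_quality").getD ""))]
        else qs) []).any (fun q => PySem.Str.isIn "PARTIAL" q) <;>
    cases hF : ((((PySem.Dict.mk row).get? "timeline").getD []).foldl
      (fun (qs : List String) event =>
        if PySem.Str.upper (PySem.Str.strip (((PySem.Dict.mk (((PySem.Dict.mk event).get? "fields").getD [])).get? "fill_quality").getD "")) ≠ "" then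
          qs ++ [PySem.Str.upper (PySem.Str.strip (((PySem.Dict.mk (((PySem.Dict.mk event).get? "fields").getD [])).get? "fill_quality").getD ""))]
        else qs) []).any (fun q => PySem.Str.isIn "FULL" q) <;>
      simp only [hP, hF] <;> rfl
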